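-- pv_equiv track=rewrite | github.com/zhoumeng-creater/create_web_origin | services/orchestrator/src/utils/wsl.py | _normalize_wsl_unc
-- ===== SOURCE A (Python) =====
-- from typing import Dict, Iterable, List, Optional, Tuple, Union
--
-- _UNC_PREFIXES = (r"\\wsl.localhost\\", r"\\wsl$\\")
--
-- def _normalize_wsl_unc(value: str) -> Optional[str]:
--     lowered = value.lower()
--     for prefix in _UNC_PREFIXES:
--         if lowered.startswith(prefix):
--             tail = value[len(prefix) :].lstrip("\\/")
--             tail = tail.replace("\\", "/")
--             parts = tail.split("/", 1)
--             if len(parts) == 2: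
--                 return "/" + parts[1].lstrip("/")
--             return "/" + tail.lstrip("/")
--     return None
-- ===== SOURCE B (Python) =====
-- from typing import Optional
--
-- _SEPS = "\\/"
--
--
-- def _normalize_wsl_unc(value: str) -> Optional[str]:
--     low = value.lower()
--     if low.startswith("\\\\wsl.localhost\\\\"):
--         tail = value[17:]
--     elif low.startswith("\\\\wsl$\\\\"):
--         tail = value[8:]
--     else:
--         return None
--     i, n = 0, len(tail)
--     while i < n and tail[i] in _SEPS:      # skip leading separators
--         i += 1
--     start = i
--     while i < n and tail[i] not in _SEPS:  # scan the first component
--         i += 1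
--     if i == n:                             # no further path: keep the component
--         return "/" + tail[start:]
--     while i < n and tail[i] in _SEPS:      # skip separators after the component
--         i += 1
--     return "/" + tail[i:].replace("\\", "/")
-- ===== Notes on version B (the rewrite author's own statement) =====
-- stated objective: alternative
-- what changed: Replaces A's build-intermediate-strings pipeline (slice, lstrip, global backslash replace, split with maxsplit) by a single left-to-right index scan over the tail that locates the component and separator boundaries directly and converts separators only in the final slice.
import Mathlib
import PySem

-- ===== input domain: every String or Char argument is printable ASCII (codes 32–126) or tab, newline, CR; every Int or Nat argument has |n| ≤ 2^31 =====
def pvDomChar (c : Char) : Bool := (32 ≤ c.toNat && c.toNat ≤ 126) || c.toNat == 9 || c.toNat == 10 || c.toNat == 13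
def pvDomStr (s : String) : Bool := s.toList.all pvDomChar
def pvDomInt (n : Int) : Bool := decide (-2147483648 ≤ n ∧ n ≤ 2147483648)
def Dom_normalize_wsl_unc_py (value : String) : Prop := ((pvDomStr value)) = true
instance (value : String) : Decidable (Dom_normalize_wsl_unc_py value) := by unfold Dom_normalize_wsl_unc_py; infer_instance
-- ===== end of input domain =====

-- B re-implements A's string pipeline (slice/lstrip/replace/split) as a single index scan over the tail; alternative decomposition, not claimed faster.
-- ===== PORT A =====
-- exact port of str.lstrip("\\/") (left-strip over the two separator characters)
def pyLstripSeps (s : String) : String :=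
  String.ofList (s.toList.dropWhile (fun c => c == '\\' || c == '/'))

-- exact port of str.lstrip("/")
def pyLstripSlash (s : String) : String :=
  String.ofList (s.toList.dropWhile (fun c => c == '/'))

def pyUncPrefixes : List String := ["\\\\wsl.localhost\\\\", "\\\\wsl$\\\\"]

def normalize_wsl_unc_loop (value lowered : String) : List String → Option String
  | [] => none
  | p :: rest =>
    if PySem.Str.startswith lowered p then
      let tail0 := pyLstripSeps (PySem.Str.slice value (some (PySem.Str.len p)) none)
      let tail := PySem.Str.replace tail0 "\\" "/"
      match PySem.Str.splitMax? tail "/" 1 with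
      | some [_, p1] => some ("/" ++ pyLstripSlash p1)   -- the len(parts) == 2 branch
      | some _ => some ("/" ++ pyLstripSlash tail)
      | none => none   -- unreachable: the separator "/" is non-empty
    else normalize_wsl_unc_loop value lowered rest

def normalize_wsl_unc_py (value : String) : Option String :=
  normalize_wsl_unc_loop value (PySem.Str.lower value) pyUncPrefixes

-- ===== PORT B =====
def altIsSep (c : Char) : Bool := c == '\\' || c == '/'

def normalize_wsl_unc_py_alt (value : String) : Option String :=
  let low := PySem.Str.lower value
  let tail? : Option (List Char) :=
    if PySem.Str.startswith low "\\\\wsl.localhost\\\\" then some (value.toList.drop 17)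
    else if PySem.Str.startswith low "\\\\wsl$\\\\" then some (value.toList.drop 8)
    else none
  match tail? with
  | none => none
  | some t =>
    let t1 := t.dropWhile altIsSep                       -- skip leading separators
    let comp := t1.takeWhile (fun c => !(altIsSep c))    -- scan the first component
    match t1.dropWhile (fun c => !(altIsSep c)) with
    | [] => some ("/" ++ String.ofList comp)             -- no further path: keep the component
    | rest => some ("/" ++ PySem.Str.replace (String.ofList (rest.dropWhile altIsSep)) "\\" "/")

-- ===== PRECONDITION & SPEC =====
def Spec_normalize_wsl_unc_py (value : String) (out : Option String) : Prop := out = normalize_wsl_unc_py_alt value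
instance (value : String) (out : Option String) : Decidable (Spec_normalize_wsl_unc_py value out) := by unfold Spec_normalize_wsl_unc_py; infer_instance

-- ===== CLAIM (what is proved, stated in full; the proofs are below) =====
def Claim_equal_normalize_wsl_unc_py : Prop := ∀ (value : String), Dom_normalize_wsl_unc_py value → Spec_normalize_wsl_unc_py value (normalize_wsl_unc_py value)

-- ===== LEMMAS AND PROOFS =====
def convSep (c : Char) : Char := if c == '\\' then '/' else c

theorem replace_go_eq_map (fuel : Nat) : ∀ (l acc : List Char), l.length ≤ fuel →
    PySem.Chars.replace.go ['\\'] ['/'] fuel l acc = acc.reverse ++ l.map convSep := by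
  induction fuel with
  | zero =>
    intro l acc h
    have hl : l = [] := by cases l <;> simp_all
    subst hl; simp [PySem.Chars.replace.go]
  | succ n ih =>
    intro l acc h
    cases l with
    | nil => simp [PySem.Chars.replace.go]
    | cons c t =>
      have ht : t.length ≤ n := by simpa using h
      by_cases hc : c = '\\'
      · subst hc
        simp [PySem.Chars.replace.go, ih _ _ ht, convSep]
      · have hc2 : (('\\':Char) = c) = False := by simp [Ne.symm hc]
        simp [PySem.Chars.replace.go, List.isPrefixOf, hc2, hc, ih _ _ ht, convSep]

theorem replace_eq_map (l : List Char) :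
    PySem.Chars.replace l ['\\'] ['/'] = l.map convSep := by
  simp [PySem.Chars.replace, replace_go_eq_map l.length l []]

theorem splitOnMax_go_zero (fuel : Nat) : ∀ (l cur : List Char) (acc : List (List Char)),
    PySem.Chars.splitOnMax.go ['/'] fuel 0 l cur acc = ((cur.reverse ++ l) :: acc).reverse := by
  cases fuel with
  | zero => intro l cur acc; simp [PySem.Chars.splitOnMax.go]
  | succ n => intro l cur acc; cases l <;> simp [PySem.Chars.splitOnMax.go]

theorem splitOnMax_go_one (fuel : Nat) : ∀ (l cur : List Char) (acc : List (List Char)),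
    l.length < fuel →
    PySem.Chars.splitOnMax.go ['/'] fuel 1 l cur acc =
      if '/' ∈ l then
        acc.reverse ++ [cur.reverse ++ l.takeWhile (fun c => !(c == '/')),
                        (l.dropWhile (fun c => !(c == '/'))).tail]
      else acc.reverse ++ [cur.reverse ++ l] := by
  induction fuel with
  | zero => intro l cur acc h; omega
  | succ n ih =>
    intro l cur acc h
    cases l with
    | nil => simp [PySem.Chars.splitOnMax.go]
    | cons c t =>
      have ht : t.length < n ∨ True := Or.inr trivial
      by_cases hc : c = '/'
      · subst hc
        simp [PySem.Chars.splitOnMax.go, splitOnMax_go_zero]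
      · have ht' : t.length < n := by simpa using h
        have hc2 : ¬ '/' = c := fun h => hc h.symm
        simp [PySem.Chars.splitOnMax.go, List.isPrefixOf, hc, hc2, ih _ _ _ ht']

theorem splitOnMax_one (l : List Char) :
    PySem.Chars.splitOnMax l ['/'] 1 =
      if '/' ∈ l then
        [l.takeWhile (fun c => !(c == '/')), (l.dropWhile (fun c => !(c == '/'))).tail]
      else [l] := by
  have h := splitOnMax_go_one (l.length + 1) l [] [] (by omega)
  simp [PySem.Chars.splitOnMax] at h ⊢
  exact h

theorem conv_slash (c : Char) : (convSep c == '/') = altIsSep c := by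
  by_cases h : c = '\\' <;> simp [convSep, altIsSep, h]

theorem tw_helper (l1 l2 : List Char) (h1 : ∀ c ∈ l1, (c == '/') = false) :
    List.takeWhile (fun c => !(c == '/')) (l1 ++ '/' :: l2) = l1 := by
  induction l1 with
  | nil => simp
  | cons a t ih =>
    have := h1 a (by simp)
    simp_all

theorem dw_helper (l1 l2 : List Char) (h1 : ∀ c ∈ l1, (c == '/') = false) :
    List.dropWhile (fun c => !(c == '/')) (l1 ++ '/' :: l2) = '/' :: l2 := by
  induction l1 with
  | nil => simp
  | cons a t ih =>
    have := h1 a (by simp)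
    simp_all

theorem dropWhile_head_false {p : Char → Bool} :
    ∀ (l : List Char) {h : Char} {rt : List Char}, l.dropWhile p = h :: rt → p h = false := by
  intro l
  induction l with
  | nil => intro h rt hr; simp at hr
  | cons a t ih =>
    intro h rt hr
    by_cases hp : p a
    · rw [List.dropWhile_cons, if_pos hp] at hr; exact ih hr
    · rw [List.dropWhile_cons, if_neg hp] at hr
      cases hr; simpa using hp

theorem tail_core (s1 : String) (t1 : List Char) (h1 : s1.toList = t1) :
    (match PySem.Str.splitMax? (PySem.Str.replace s1 "\\" "/") "/" 1 with
     | some [_, p1] => some ("/" ++ pyLstripSlash p1)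
     | some _ => some ("/" ++ pyLstripSlash (PySem.Str.replace s1 "\\" "/"))
     | none => none) =
    (match t1.dropWhile (fun c => !(altIsSep c)) with
     | [] => some ("/" ++ String.ofList (t1.takeWhile (fun c => !(altIsSep c))))
     | rest => some ("/" ++ PySem.Str.replace (String.ofList (rest.dropWhile altIsSep)) "\\" "/")) := by
  have htail : (PySem.Str.replace s1 "\\" "/").toList = t1.map convSep := by
    simp [PySem.Str.replace, h1, replace_eq_map]
  have hsplit : PySem.Str.splitMax? (PySem.Str.replace s1 "\\" "/") "/" 1
      = some ((PySem.Chars.splitOnMax (t1.map convSep) ['/'] 1).map String.ofList) := by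
    simp [PySem.Str.splitMax?, PySem.Chars.splitMax?, htail]
  rcases hr : t1.dropWhile (fun c => !(altIsSep c)) with _ | ⟨h, rt⟩
  · -- no separator after the first component
    have hall : ∀ c ∈ t1, altIsSep c = false := by
      intro c hc
      have := List.dropWhile_eq_nil_iff.mp hr
      simpa using this c hc
    have hmapid : t1.map convSep = t1 := by
      conv_rhs => rw [← List.map_id t1]
      refine List.map_congr_left (fun c hc => ?_)
      have h2 := hall c hc
      simp only [altIsSep, Bool.or_eq_false_iff, beq_eq_false_iff_ne, ne_eq] at h2
      simp [convSep, h2.1]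
    have hnone : ('/' ∈ t1.map convSep) = False := by
      simp only [hmapid, eq_iff_iff, iff_false]
      intro hm
      have := hall _ hm
      simp [altIsSep] at this
    have htw : t1.takeWhile (fun c => !(altIsSep c)) = t1 := by
      have h2 := List.takeWhile_append_dropWhile (p := fun c => !(altIsSep c)) (l := t1)
      rw [hr, List.append_nil] at h2; exact h2
    have hlss : pyLstripSlash (PySem.Str.replace s1 "\\" "/") = String.ofList t1 := by
      simp only [pyLstripSlash, htail, hmapid]
      congr 1
      cases ht1c : t1 with
      | nil => rfl
      | cons a t =>
        have := hall a (by rw [ht1c]; simp)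
        simp only [altIsSep, Bool.or_eq_false_iff] at this
        simp [this.2]
    simp only [hsplit, splitOnMax_one, hnone, if_false, List.map, htw, hlss]
  · -- a separator follows the first component
    have hne : t1.dropWhile (fun c => !(altIsSep c)) ≠ [] := by rw [hr]; simp
    have hsep : altIsSep h = true := by
      have := dropWhile_head_false t1 hr
      simpa using this
    have hdecomp : t1.takeWhile (fun c => !(altIsSep c)) ++ h :: rt = t1 := by
      rw [← hr, List.takeWhile_append_dropWhile]
    have hcompf : ∀ c ∈ t1.takeWhile (fun c => !(altIsSep c)), (c == '/') = false := by
      intro c hc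
      have := List.mem_takeWhile_imp hc
      simp only [altIsSep, Bool.not_eq_eq_eq_not, Bool.not_true, Bool.or_eq_false_iff] at this
      exact this.2
    have hcompid : (t1.takeWhile (fun c => !(altIsSep c))).map convSep
        = t1.takeWhile (fun c => !(altIsSep c)) := by
      conv_rhs => rw [← List.map_id (t1.takeWhile (fun c => !(altIsSep c)))]
      refine List.map_congr_left (fun c hc => ?_)
      have := List.mem_takeWhile_imp hc
      simp only [altIsSep, Bool.not_eq_eq_eq_not, Bool.not_true, Bool.or_eq_false_iff,
        beq_eq_false_iff_ne, ne_eq] at this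
      simp [convSep, this.1]
    have hconvh : convSep h = '/' := by
      simp only [altIsSep, Bool.or_eq_true, beq_iff_eq] at hsep
      rcases hsep with h1 | h1 <;> simp [convSep, h1]
    have hmap : t1.map convSep
        = t1.takeWhile (fun c => !(altIsSep c)) ++ '/' :: rt.map convSep := by
      conv_lhs => rw [← hdecomp]
      simp [hcompid, hconvh]
    have hmem : ('/' ∈ t1.takeWhile (fun c => !(altIsSep c)) ++ '/' :: rt.map convSep) = True := by
      simp
    have hdw : (rt.map convSep).dropWhile (fun c => c == '/')
        = (rt.dropWhile altIsSep).map convSep := by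
      rw [List.dropWhile_map]
      have hfun : ((fun c => c == '/') ∘ convSep) = altIsSep := by
        funext c; simp only [Function.comp_apply, conv_slash]
      rw [hfun]
    have hlss2 : pyLstripSlash (String.ofList (rt.map convSep))
        = String.ofList ((rt.dropWhile altIsSep).map convSep) := by
      simp only [pyLstripSlash]
      congr 1
      rw [show (String.ofList (rt.map convSep)).toList = rt.map convSep by simp]
      exact hdw
    have hrepl : PySem.Str.replace (String.ofList ((h :: rt).dropWhile altIsSep)) "\\" "/"
        = String.ofList ((rt.dropWhile altIsSep).map convSep) := by
      simp only [PySem.Str.replace]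
      congr 1
      rw [show (String.ofList ((h :: rt).dropWhile altIsSep)).toList
           = (h :: rt).dropWhile altIsSep by simp]
      rw [List.dropWhile_cons, if_pos hsep]
      exact replace_eq_map _
    simp only [hsplit, splitOnMax_one, hmem, if_true, hmap,
      tw_helper _ _ hcompf, dw_helper _ _ hcompf, List.map, List.tail_cons, hlss2, hrepl]

theorem branch_hyp (value : String) (k : Nat) (p : String) (hp : PySem.Str.len p = (k : Int)) :
    (pyLstripSeps (PySem.Str.slice value (some (PySem.Str.len p)) none)).toList
      = (value.toList.drop k).dropWhile altIsSep := by
  simp only [pyLstripSeps, hp]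
  rw [show (String.ofList ((PySem.Str.slice value (some ((k:Int))) none).toList.dropWhile
        (fun c => c == '\\' || c == '/'))).toList
      = (PySem.Str.slice value (some ((k:Int))) none).toList.dropWhile
        (fun c => c == '\\' || c == '/') by simp]
  rw [show (PySem.Str.slice value (some ((k:Int))) none).toList = value.toList.drop k by
    simp [PySem.List.slice_from_natCast]]
  rfl

-- ===== VERDICT (by name: the statement is the Claim_ definition above) =====
set_option maxHeartbeats 1000000 in
theorem normalize_wsl_unc_py_spec : Claim_equal_normalize_wsl_unc_py := by
  intro value _
  unfold Spec_normalize_wsl_unc_py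
  show normalize_wsl_unc_py value = normalize_wsl_unc_py_alt value
  by_cases h1 : PySem.Str.startswith (PySem.Str.lower value) "\\\\wsl.localhost\\\\"
  · simp only [normalize_wsl_unc_py, normalize_wsl_unc_py_alt, pyUncPrefixes,
      normalize_wsl_unc_loop, h1, if_true]
    rw [tail_core _ _ (branch_hyp value 17 _ (by decide))]
  · by_cases h2 : PySem.Str.startswith (PySem.Str.lower value) "\\\\wsl$\\\\"
    · simp only [normalize_wsl_unc_py, normalize_wsl_unc_py_alt, pyUncPrefixes,
        normalize_wsl_unc_loop, h1, h2, if_true, if_false, Bool.false_eq_true]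
      rw [tail_core _ _ (branch_hyp value 8 _ (by decide))]
    · simp only [normalize_wsl_unc_py, normalize_wsl_unc_py_alt, pyUncPrefixes,
        normalize_wsl_unc_loop, h1, h2, if_false, Bool.false_eq_true]
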